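-- pv_equiv track=rewrite | github.com/muhi4/gradenotify | oldversion/gradenotify3.0.0.py | createmessage
-- ===== SOURCE A (Python) =====
-- def createmessage(dif, modi):
--     # line送信用
--     mesforline = []
--     # 修正分
--     for i in range(len(modi)):
--         mesforline.append(str(modi[i][0]) + ':' +str(modi[i][1]) + '→' + str(modi[i][2]))
--         # 最終行でないとき
--         if(i != len(modi)-1):
--             mesforline.append('\n')
--         else:
--             # 最終行かつ更新がある場合(修正だけのときにメッセージの末尾に無駄な改行が発生しないようにするため)
--             if(len(dif) != 0):
--                 mesforline.append('\n')
--     # 更新分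
--     for i in range(len(dif)):
--         mesforline.append(str(dif[i][0]) + ':' + str(dif[i][2]))
--         if(i != len(dif)-1):
--             mesforline.append('\n')
--
--     return mesforline
-- ===== SOURCE B (Python) =====
-- def createmessage(dif, modi):
--     # Build the token list back-to-front by recursion: the separator after a
--     # line is needed exactly when the recursively built suffix is nonempty,
--     # so no index arithmetic or len(dif) special case is required.
--     def build(rows, fmt, tail):
--         if not rows:
--             return tail
--         rest = build(rows[1:], fmt, tail)
--         head = fmt(rows[0])
--         return [head] if not rest else [head, '\n'] + rest
--     tail = build(dif, lambda d: str(d[0]) + ':' + str(d[2]), [])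
--     return build(modi, lambda m: str(m[0]) + ':' + str(m[1]) + '→' + str(m[2]), tail)
-- ===== Notes on version B (the rewrite author's own statement) =====
-- stated objective: alternative
-- what changed: B builds the token list back-to-front by structural recursion, deciding whether a '\n' follows a line by whether the recursively built suffix is nonempty, replacing A's two index loops with their last-index and len(dif) special cases.
import Mathlib
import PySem

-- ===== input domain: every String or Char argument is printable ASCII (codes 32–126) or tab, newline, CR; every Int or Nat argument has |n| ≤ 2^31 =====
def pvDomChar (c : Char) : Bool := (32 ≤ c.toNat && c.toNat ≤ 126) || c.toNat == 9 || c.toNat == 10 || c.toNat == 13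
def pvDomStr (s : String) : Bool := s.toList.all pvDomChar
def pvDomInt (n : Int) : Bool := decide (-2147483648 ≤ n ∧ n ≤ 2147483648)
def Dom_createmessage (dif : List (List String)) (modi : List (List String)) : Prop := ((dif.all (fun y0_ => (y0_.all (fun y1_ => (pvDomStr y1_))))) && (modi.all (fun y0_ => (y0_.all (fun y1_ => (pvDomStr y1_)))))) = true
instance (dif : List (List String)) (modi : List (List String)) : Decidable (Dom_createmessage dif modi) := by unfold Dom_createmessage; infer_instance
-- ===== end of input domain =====

-- B builds the token list back-to-front by recursion (a '\n' follows a line iff the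
-- recursively built suffix is nonempty); A runs two index loops with special cases.

-- ===== PORT A =====
def createmessage (dif : List (List String)) (modi : List (List String)) : List String :=
  let mesforline : List String := []
  -- for i in range(len(modi)): append entry; '\n' unless last, or last with dif nonempty
  let mesforline := (PySem.List.pyRange 0 (modi.length : Int) 1).foldl (fun mesforline i =>
      let mesforline := mesforline ++
        [PySem.List.pyGetD (PySem.List.pyGetD modi i []) 0 "" ++ ":" ++
         PySem.List.pyGetD (PySem.List.pyGetD modi i []) 1 "" ++ "→" ++
         PySem.List.pyGetD (PySem.List.pyGetD modi i []) 2 ""]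
      if i ≠ (modi.length : Int) - 1 then mesforline ++ ["\n"]
      else if (dif.length : Int) ≠ 0 then mesforline ++ ["\n"] else mesforline) mesforline
  -- for i in range(len(dif)): append entry; '\n' unless last
  let mesforline := (PySem.List.pyRange 0 (dif.length : Int) 1).foldl (fun mesforline i =>
      let mesforline := mesforline ++
        [PySem.List.pyGetD (PySem.List.pyGetD dif i []) 0 "" ++ ":" ++
         PySem.List.pyGetD (PySem.List.pyGetD dif i []) 2 ""]
      if i ≠ (dif.length : Int) - 1 then mesforline ++ ["\n"] else mesforline) mesforline
  mesforline

-- ===== PORT B =====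
def bModiLine (m : List String) : String :=
  PySem.List.pyGetD m 0 "" ++ ":" ++ PySem.List.pyGetD m 1 "" ++ "→" ++ PySem.List.pyGetD m 2 ""
def bDifLine (d : List String) : String :=
  PySem.List.pyGetD d 0 "" ++ ":" ++ PySem.List.pyGetD d 2 ""
-- Source B's inner 'build': recursion on rows, '\n' iff the built suffix is nonempty
def bBuild (rows : List (List String)) (fmt : List String → String) (tail : List String) : List String :=
  match rows with
  | [] => tail
  | r :: rs =>
    let rest := bBuild rs fmt tail
    let head := fmt r
    if rest = [] then [head] else [head, "\n"] ++ rest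
def createmessage_alt (dif : List (List String)) (modi : List (List String)) : List String :=
  let tail := bBuild dif bDifLine []
  bBuild modi bModiLine tail

-- ===== PRECONDITION & SPEC =====
-- Pre_ excludes exactly the inputs where the Python A raises IndexError: a row of
-- modi or dif with fewer than 3 elements (A reads indices 0,1,2 resp. 0 and 2).
def Pre_createmessage (dif : List (List String)) (modi : List (List String)) : Prop :=
  (∀ m ∈ modi, 3 ≤ m.length) ∧ (∀ d ∈ dif, 3 ≤ d.length)
instance (dif : List (List String)) (modi : List (List String)) : Decidable (Pre_createmessage dif modi) := by unfold Pre_createmessage; infer_instance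
def pvWitness_createmessage : List (List String) × List (List String) :=
  ([["math", "old", "85"]], [["eng", "70", "75"]])
def Spec_createmessage (dif : List (List String)) (modi : List (List String)) (out : List String) : Prop := out = createmessage_alt dif modi
instance (dif : List (List String)) (modi : List (List String)) (out : List String) : Decidable (Spec_createmessage dif modi out) := by unfold Spec_createmessage; infer_instance

-- ===== CLAIM (what is proved, stated in full; the proofs are below) =====
def Claim_equal_createmessage : Prop := ∀ (dif : List (List String)) (modi : List (List String)), Dom_createmessage dif modi → Pre_createmessage dif modi → Spec_createmessage dif modi (createmessage dif modi)

-- ===== LEMMAS AND PROOFS =====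

-- lines with '\n' after each element
def sepAfter (xs : List String) : List String := xs.flatMap (fun l => [l, "\n"])
-- lines with '\n' between consecutive elements
def interleave (xs : List String) : List String :=
  match xs with
  | [] => []
  | l :: ls => l :: ls.flatMap (fun x => ["\n", x])

@[simp] theorem interleave_nil : interleave [] = [] := rfl
@[simp] theorem interleave_cons (l : String) (ls : List String) :
    interleave (l :: ls) = l :: ls.flatMap (fun x => ["\n", x]) := rfl

-- B's recursion characterized by tail emptiness
theorem bBuild_char (rows : List (List String)) (fmt : List String → String) (tail : List String) :
    bBuild rows fmt tail =
      (if tail = [] then interleave (rows.map fmt) else sepAfter (rows.map fmt) ++ tail) := by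
  induction rows with
  | nil => by_cases h : tail = [] <;> simp [bBuild, h, sepAfter]
  | cons r rs ih =>
    by_cases h : tail = []
    · subst h
      rw [if_pos rfl] at ih ⊢
      cases rs with
      | nil => simp [bBuild]
      | cons a as =>
        simp only [bBuild] at ih ⊢
        rw [ih]
        simp
    · rw [if_neg h] at ih ⊢
      have hne : sepAfter (rs.map fmt) ++ tail ≠ [] := by simp [h]
      simp only [bBuild, ih]
      rw [if_neg hne]
      simp [sepAfter]

-- A's index loop, in List.range form
theorem loopN (f : List String → String) (trail : Prop) [Decidable trail]
    (xs : List (List String)) (acc : List String) :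
    (List.range xs.length).foldl (fun (mes : List String) (k : Nat) =>
        if (k : Int) ≠ (xs.length : Int) - 1 then mes ++ [f (xs.getD k [])] ++ ["\n"]
        else if trail then mes ++ [f (xs.getD k [])] ++ ["\n"]
        else mes ++ [f (xs.getD k [])]) acc
      = acc ++ (if trail then sepAfter (xs.map f) else interleave (xs.map f)) := by
  induction xs generalizing acc with
  | nil =>
    by_cases h : trail <;> simp [h, sepAfter]
  | cons x xs ih =>
    rw [List.length_cons, List.range_succ_eq_map, List.foldl_cons, List.foldl_map]
    have hshift : (fun (mes : List String) (k : Nat) =>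
          if ((k.succ : Nat) : Int) ≠ ((xs.length + 1 : Nat) : Int) - 1 then
            mes ++ [f ((x :: xs).getD k.succ [])] ++ ["\n"]
          else if trail then mes ++ [f ((x :: xs).getD k.succ [])] ++ ["\n"]
          else mes ++ [f ((x :: xs).getD k.succ [])])
        = (fun (mes : List String) (k : Nat) =>
          if (k : Int) ≠ (xs.length : Int) - 1 then mes ++ [f (xs.getD k [])] ++ ["\n"]
          else if trail then mes ++ [f (xs.getD k [])] ++ ["\n"]
          else mes ++ [f (xs.getD k [])]) := by
      funext mes k
      have hg : (x :: xs).getD k.succ [] = xs.getD k [] := rfl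
      have hcond : (((k.succ : Nat) : Int) ≠ ((xs.length + 1 : Nat) : Int) - 1)
          ↔ ((k : Int) ≠ (xs.length : Int) - 1) := by push_cast; omega
      rw [hg, if_congr hcond rfl rfl]
    rw [hshift, ih]
    cases xs with
    | nil =>
      have hc : ¬ (((0 : Nat) : Int) ≠ ((([] : List (List String)).length + 1 : Nat) : Int) - 1) := by
        simp
      rw [if_neg hc]
      by_cases h : trail <;> simp [h, sepAfter]
    | cons y ys =>
      have hc : (((0 : Nat) : Int) ≠ (((y :: ys).length + 1 : Nat) : Int) - 1) := by
        simp
        omega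
      rw [if_pos hc]
      by_cases h : trail
      · simp [h, sepAfter]
      · simp [h]

-- bridge pyRange-with-Int-index loops to List.range form
theorem rangeN_fold (f : List String → String) (trail : Prop) [Decidable trail]
    (xs : List (List String)) (acc : List String) :
    (PySem.List.pyRange 0 (xs.length : Int) 1).foldl (fun mes i =>
        if i ≠ (xs.length : Int) - 1 then mes ++ [f (PySem.List.pyGetD xs i [])] ++ ["\n"]
        else if trail then mes ++ [f (PySem.List.pyGetD xs i [])] ++ ["\n"]
        else mes ++ [f (PySem.List.pyGetD xs i [])]) acc
      = acc ++ (if trail then sepAfter (xs.map f) else interleave (xs.map f)) := by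
  rw [PySem.List.pyRange_one]
  have h1 : (((xs.length : Int)) - 0).toNat = xs.length := by omega
  rw [h1, List.foldl_map]
  have hb : (fun (mes : List String) (k : Nat) =>
        if (0 + (k : Int)) ≠ ((xs.length : Int)) - 1 then
          mes ++ [f (PySem.List.pyGetD xs (0 + (k : Int)) [])] ++ ["\n"]
        else if trail then mes ++ [f (PySem.List.pyGetD xs (0 + (k : Int)) [])] ++ ["\n"]
        else mes ++ [f (PySem.List.pyGetD xs (0 + (k : Int)) [])])
      = (fun (mes : List String) (k : Nat) =>
        if (k : Int) ≠ (xs.length : Int) - 1 then mes ++ [f (xs.getD k [])] ++ ["\n"]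
        else if trail then mes ++ [f (xs.getD k [])] ++ ["\n"]
        else mes ++ [f (xs.getD k [])]) := by
    funext mes k
    rw [zero_add, PySem.List.pyGetD_natCast]
  rw [hb, loopN]

theorem a_char (dif modi : List (List String)) :
    createmessage dif modi =
      (if ((dif.length : Int) ≠ 0) then sepAfter (modi.map bModiLine)
       else interleave (modi.map bModiLine))
      ++ interleave (dif.map bDifLine) := by
  show (PySem.List.pyRange 0 ((dif.length : Int)) 1).foldl (fun mes i =>
        if i ≠ (dif.length : Int) - 1 then
          mes ++ [bDifLine (PySem.List.pyGetD dif i [])] ++ ["\n"]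
        else mes ++ [bDifLine (PySem.List.pyGetD dif i [])])
      ((PySem.List.pyRange 0 ((modi.length : Int)) 1).foldl (fun mes i =>
        if i ≠ (modi.length : Int) - 1 then
          mes ++ [bModiLine (PySem.List.pyGetD modi i [])] ++ ["\n"]
        else if ((dif.length : Int) ≠ 0) then
          mes ++ [bModiLine (PySem.List.pyGetD modi i [])] ++ ["\n"]
        else mes ++ [bModiLine (PySem.List.pyGetD modi i [])]) [])
    = _
  have hdbody : (fun (mes : List String) (i : Int) =>
        if i ≠ (dif.length : Int) - 1 then
          mes ++ [bDifLine (PySem.List.pyGetD dif i [])] ++ ["\n"]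
        else mes ++ [bDifLine (PySem.List.pyGetD dif i [])])
      = (fun (mes : List String) (i : Int) =>
        if i ≠ (dif.length : Int) - 1 then
          mes ++ [bDifLine (PySem.List.pyGetD dif i [])] ++ ["\n"]
        else if False then
          mes ++ [bDifLine (PySem.List.pyGetD dif i [])] ++ ["\n"]
        else mes ++ [bDifLine (PySem.List.pyGetD dif i [])]) := by
    funext mes i
    simp
  rw [rangeN_fold bModiLine ((dif.length : Int) ≠ 0) modi, hdbody,
     rangeN_fold bDifLine False dif]
  simp

-- ===== VERDICT (by name: the statement is the Claim_ definition above) =====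
theorem createmessage_spec : Claim_equal_createmessage := by
  intro dif modi _ _
  show createmessage dif modi = createmessage_alt dif modi
  show _ = bBuild modi bModiLine (bBuild dif bDifLine [])
  rw [a_char, bBuild_char dif bDifLine [], if_pos rfl,
      bBuild_char modi bModiLine (interleave (dif.map bDifLine))]
  by_cases h : dif = []
  · simp [h]
  · have hne : interleave (dif.map bDifLine) ≠ [] := by
      cases dif with
      | nil => exact absurd rfl h
      | cons a as => simp [interleave]
    rw [if_neg hne, if_pos (by simpa using h)]
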